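-- pv_equiv track=rewrite | github.com/VishVasantth/comeback | backend/app.py | find_closest_landmark
-- ===== SOURCE A (Python) =====
-- def manhattan_distance(pos1, pos2):
--     """Calculate Manhattan distance between two grid positions"""
--     x1, y1 = pos1
--     x2, y2 = pos2
--     return abs(x1 - x2) + abs(y1 - y2)
--
-- def find_closest_landmark(landmarks, coords):
--     """Find the closest landmark to the given coordinates"""
--     closest = None
--     min_dist = float('inf')
--
--     for name, pos in landmarks.items():
--         # Calculate distance
--         dist = manhattan_distance(coords, pos)
--         if dist < min_dist:
--             min_dist = dist
--             closest = name
--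
--     return closest
-- ===== SOURCE B (Python) =====
-- def find_closest_landmark(landmarks, coords):
--     if not landmarks:
--         return None
--     cx, cy = coords
--     ranked = sorted(landmarks.items(),
--                     key=lambda item: abs(cx - item[1][0]) + abs(cy - item[1][1]))
--     return ranked[0][0]
-- ===== Notes on version B (the rewrite author's own statement) =====
-- stated objective: alternative
-- what changed: Replaced the running strict-< minimum scan with a sort of the items by Manhattan distance (stable, so ties keep the first-occurring landmark) followed by taking the first element, returning None on empty input where A's loop never fires.
import Mathlib
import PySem

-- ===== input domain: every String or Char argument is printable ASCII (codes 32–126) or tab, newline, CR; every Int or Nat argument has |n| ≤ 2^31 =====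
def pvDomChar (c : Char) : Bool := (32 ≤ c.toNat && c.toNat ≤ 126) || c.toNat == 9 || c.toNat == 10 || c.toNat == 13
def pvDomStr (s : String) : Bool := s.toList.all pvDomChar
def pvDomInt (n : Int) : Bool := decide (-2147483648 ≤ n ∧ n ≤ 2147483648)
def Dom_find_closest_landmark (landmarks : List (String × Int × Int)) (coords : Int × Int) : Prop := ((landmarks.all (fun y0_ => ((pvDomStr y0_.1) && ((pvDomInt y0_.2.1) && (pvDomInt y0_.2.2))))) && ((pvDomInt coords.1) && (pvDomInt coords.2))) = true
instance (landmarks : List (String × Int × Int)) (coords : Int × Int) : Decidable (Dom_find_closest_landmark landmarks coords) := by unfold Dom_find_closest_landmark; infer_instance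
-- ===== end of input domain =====

-- B replaces A's running strict-< minimum scan by a stable sort of the landmarks by
-- Manhattan distance followed by taking the first element (alternative decomposition, same result).


-- ===== PORT A =====
def manhattan_distance (pos1 pos2 : Int × Int) : Int :=
  |pos1.1 - pos2.1| + |pos1.2 - pos2.2|

-- the loop state is (closest, min_dist); min_dist = none models float('inf'),
-- below which every distance compares strictly smaller
def find_closest_landmark (landmarks : List (String × Int × Int)) (coords : Int × Int) : Option String :=
  (landmarks.foldl
    (fun st np =>
      let dist := manhattan_distance coords np.2
      match st.2 with
      | none => (some np.1, some dist)
      | some m => if dist < m then (some np.1, some dist) else st)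
    ((none : Option String), (none : Option Int))).1

-- ===== PORT B =====
def find_closest_landmark_alt (landmarks : List (String × Int × Int)) (coords : Int × Int) : Option String :=
  if landmarks.isEmpty then none
  else
    match PySem.List.sorted landmarks
        (fun item => |coords.1 - item.2.1| + |coords.2 - item.2.2|) false with
    | [] => none        -- unreachable: landmarks nonempty
    | p :: _ => some p.1

-- ===== PRECONDITION & SPEC =====
def Spec_find_closest_landmark (landmarks : List (String × Int × Int)) (coords : Int × Int) (out : Option String) : Prop := out = find_closest_landmark_alt landmarks coords
instance (landmarks : List (String × Int × Int)) (coords : Int × Int) (out : Option String) : Decidable (Spec_find_closest_landmark landmarks coords out) := by unfold Spec_find_closest_landmark; infer_instance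

-- ===== CLAIM (what is proved, stated in full; the proofs are below) =====
def Claim_equal_find_closest_landmark : Prop := ∀ (landmarks : List (String × Int × Int)) (coords : Int × Int), Dom_find_closest_landmark landmarks coords → Spec_find_closest_landmark landmarks coords (find_closest_landmark landmarks coords)

-- ===== LEMMAS AND PROOFS =====

-- head-of-accumulator abstraction: A's loop state as a function of the sorted accumulator
def pvHeadState (coords : Int × Int) : List (String × Int × Int) → Option String × Option Int
  | [] => (none, none)
  | p :: _ => (some p.1, some (manhattan_distance coords p.2))

theorem pvStep_insertBy (coords : Int × Int) (acc : List (String × Int × Int))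
    (x : String × Int × Int) :
    (let dist := manhattan_distance coords x.2
     match (pvHeadState coords acc).2 with
     | none => (some x.1, some dist)
     | some m => if dist < m then (some x.1, some dist) else pvHeadState coords acc)
    = pvHeadState coords
        (PySem.List.insertBy
          (fun a b => decide (manhattan_distance coords a.2 < manhattan_distance coords b.2))
          x acc) := by
  cases acc with
  | nil => simp [pvHeadState, PySem.List.insertBy]
  | cons y t =>
    simp only [pvHeadState, PySem.List.insertBy]
    by_cases h : manhattan_distance coords x.2 < manhattan_distance coords y.2 <;>
      simp [h]

theorem pvFold_headState (coords : Int × Int) (xs acc : List (String × Int × Int)) :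
    xs.foldl
      (fun st (np : String × Int × Int) =>
        let dist := manhattan_distance coords np.2
        match st.2 with
        | none => (some np.1, some dist)
        | some m => if dist < m then (some np.1, some dist) else st)
      (pvHeadState coords acc)
    = pvHeadState coords
        (xs.foldl (fun acc x =>
          PySem.List.insertBy
            (fun a b => decide (manhattan_distance coords a.2 < manhattan_distance coords b.2))
            x acc) acc) := by
  induction xs generalizing acc with
  | nil => rfl
  | cons x t ih =>
    rw [List.foldl_cons, List.foldl_cons, pvStep_insertBy coords acc x]
    exact ih _

theorem find_closest_landmark_spec : Claim_equal_find_closest_landmark := by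
  intro landmarks coords _
  unfold Spec_find_closest_landmark find_closest_landmark find_closest_landmark_alt
  have hk : (fun item : String × Int × Int => |coords.1 - item.2.1| + |coords.2 - item.2.2|)
      = fun item => manhattan_distance coords item.2 := by
    funext item; simp [manhattan_distance]
  rw [hk]
  have hsorted := PySem.List.sorted_eq_foldl_insertBy landmarks
    (fun item : String × Int × Int => manhattan_distance coords item.2)
  have h0 : ((none : Option String), (none : Option Int)) = pvHeadState coords [] := rfl
  rw [h0, pvFold_headState coords landmarks []]
  rw [hsorted]
  cases hs : landmarks.foldl (fun acc x =>
      PySem.List.insertBy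
        (fun a b => decide (manhattan_distance coords a.2 < manhattan_distance coords b.2))
        x acc) [] with
  | nil =>
    have : landmarks = [] := by
      by_contra hne
      cases landmarks with
      | nil => exact hne rfl
      | cons a t =>
        have hperm : (PySem.List.sorted (a :: t)
            (fun item => manhattan_distance coords item.2) false).Perm (a :: t) :=
          PySem.List.sorted_perm _ _ _
        rw [hsorted, hs] at hperm
        exact absurd hperm.symm (by simp)
    simp [this, pvHeadState]
  | cons p rest =>
    have hne : landmarks ≠ [] := by
      intro h; rw [h] at hs; simp at hs
    simp [pvHeadState, List.isEmpty_iff, hne]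

-- ===== VERDICT (by name: the statement is the Claim_ definition above) =====
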